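-- pv_equiv track=rewrite | github.com/ProFrenchToast/Visual_Perspective_taking_clone | director_task/sample.py | _get_valid_reference_positions_for_ambiguity
-- ===== SOURCE A (Python) =====
-- from typing import List, Optional, Union
--
-- def _get_valid_reference_positions_for_ambiguity(spatial_relation: str, width: int, height: int) -> List[tuple[int, int]]:
--     """Get valid reference positions that ensure at least 2 target positions for ambiguity"""
--     valid_positions = []
--
--     if spatial_relation == "right_of":
--         # Reference must have at least 2 spaces to the right
--         for y in range(height):
--             for x in range(width - 2):  # Leave at least 2 columns to the right
--                 valid_positions.append((x, y))
--     elif spatial_relation == "left_of":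
--         # Reference must have at least 2 spaces to the left
--         for y in range(height):
--             for x in range(2, width):  # Leave at least 2 columns to the left
--                 valid_positions.append((x, y))
--     elif spatial_relation == "above":
--         # Reference must have at least 2 spaces above
--         for y in range(2, height):  # Leave at least 2 rows above
--             for x in range(width):
--                 valid_positions.append((x, y))
--     elif spatial_relation == "below":
--         # Reference must have at least 2 spaces below
--         for y in range(height - 2):  # Leave at least 2 rows below
--             for x in range(width):
--                 valid_positions.append((x, y))
--
--     return valid_positions
-- ===== SOURCE B (Python) =====
-- def _get_valid_reference_positions_for_ambiguity(spatial_relation, width, height):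
--     """Get valid reference positions that ensure at least 2 target positions for ambiguity"""
--     bounds = {
--         "right_of": (0, width - 2, 0, height),
--         "left_of": (2, width, 0, height),
--         "above": (0, width, 2, height),
--         "below": (0, width, 0, height - 2),
--     }
--     if spatial_relation not in bounds:
--         return []
--     x0, x1, y0, y1 = bounds[spatial_relation]
--     nx = max(x1 - x0, 0)
--     ny = max(y1 - y0, 0)
--     # single flat loop: position k maps to (x0 + k % nx, y0 + k // nx)
--     return [(x0 + k % nx, y0 + k // nx) for k in range(nx * ny)]
-- ===== Notes on version B (the rewrite author's own statement) =====
-- stated objective: alternative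
-- what changed: Replaces A's four per-relation nested double loops with a flattened single-index enumeration: after a bounds-table lookup, one loop over k in range(nx*ny) produces each position by divmod (x0 + k % nx, y0 + k // nx).
import Mathlib
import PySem

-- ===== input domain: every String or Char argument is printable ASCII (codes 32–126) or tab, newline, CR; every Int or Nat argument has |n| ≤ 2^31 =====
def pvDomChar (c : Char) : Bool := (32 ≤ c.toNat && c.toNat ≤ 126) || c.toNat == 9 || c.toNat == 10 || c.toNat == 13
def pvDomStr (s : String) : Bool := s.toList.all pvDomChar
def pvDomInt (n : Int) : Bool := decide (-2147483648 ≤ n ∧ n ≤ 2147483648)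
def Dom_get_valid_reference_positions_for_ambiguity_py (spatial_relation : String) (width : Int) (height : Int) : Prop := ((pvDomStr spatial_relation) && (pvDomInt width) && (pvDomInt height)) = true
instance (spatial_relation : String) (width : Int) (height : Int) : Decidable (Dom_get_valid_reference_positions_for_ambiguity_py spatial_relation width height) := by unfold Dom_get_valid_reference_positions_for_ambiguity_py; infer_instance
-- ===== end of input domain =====

-- B: replaces A's four per-relation nested double loops by a bounds lookup and ONE flat loop over k in range(nx*ny), recovering each position by divmod; alternative decomposition, same cost.


-- ===== PORT A =====
-- Literal port of A: four relation branches, each a y-outer / x-inner append loop.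
def get_valid_reference_positions_for_ambiguity_py (spatial_relation : String) (width : Int) (height : Int) : List (Int × Int) :=
  if spatial_relation == "right_of" then
    (PySem.List.pyRange 0 height 1).foldl (fun acc y =>
      (PySem.List.pyRange 0 (width - 2) 1).foldl (fun acc2 x => acc2 ++ [(x, y)]) acc) []
  else if spatial_relation == "left_of" then
    (PySem.List.pyRange 0 height 1).foldl (fun acc y =>
      (PySem.List.pyRange 2 width 1).foldl (fun acc2 x => acc2 ++ [(x, y)]) acc) []
  else if spatial_relation == "above" then
    (PySem.List.pyRange 2 height 1).foldl (fun acc y =>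
      (PySem.List.pyRange 0 width 1).foldl (fun acc2 x => acc2 ++ [(x, y)]) acc) []
  else if spatial_relation == "below" then
    (PySem.List.pyRange 0 (height - 2) 1).foldl (fun acc y =>
      (PySem.List.pyRange 0 width 1).foldl (fun acc2 x => acc2 ++ [(x, y)]) acc) []
  else []

-- ===== PORT B =====
-- Port of B: bounds-table lookup, then one flat loop over range(nx*ny) with divmod.
def get_valid_reference_positions_for_ambiguity_py_alt (spatial_relation : String) (width : Int) (height : Int) : List (Int × Int) :=
  let bounds : PySem.Dict String (Int × Int × Int × Int) :=
    ((((PySem.Dict.empty).insert "right_of" (0, width - 2, 0, height)).insert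
        "left_of" (2, width, 0, height)).insert
        "above" (0, width, 2, height)).insert
        "below" (0, width, 0, height - 2)
  match bounds.get? spatial_relation with
  | none => []
  | some (x0, x1, y0, y1) =>
    let nx := max (x1 - x0) 0
    let ny := max (y1 - y0) 0
    (PySem.List.pyRange 0 (nx * ny) 1).map
      (fun k => (x0 + PySem.Int.mod k nx, y0 + PySem.Int.floordiv k nx))

-- ===== PRECONDITION & SPEC =====
def Spec_get_valid_reference_positions_for_ambiguity_py (spatial_relation : String) (width : Int) (height : Int) (out : List (Int × Int)) : Prop := out = get_valid_reference_positions_for_ambiguity_py_alt spatial_relation width height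
instance (spatial_relation : String) (width : Int) (height : Int) (out : List (Int × Int)) : Decidable (Spec_get_valid_reference_positions_for_ambiguity_py spatial_relation width height out) := by unfold Spec_get_valid_reference_positions_for_ambiguity_py; infer_instance

-- ===== CLAIM (what is proved, stated in full; the proofs are below) =====
def Claim_equal_get_valid_reference_positions_for_ambiguity_py : Prop := ∀ (spatial_relation : String) (width : Int) (height : Int), Dom_get_valid_reference_positions_for_ambiguity_py spatial_relation width height → Spec_get_valid_reference_positions_for_ambiguity_py spatial_relation width height (get_valid_reference_positions_for_ambiguity_py spatial_relation width height)

-- ===== LEMMAS AND PROOFS =====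

-- Flattening over Nat ranges: the y-outer/x-inner grid equals divmod enumeration of a single range.
theorem pv_flatten (nx : Nat) (x0 y0 : Int) : ∀ (ny : Nat),
    (List.range ny).flatMap (fun (j : Nat) => (List.range nx).map (fun (i : Nat) => (x0 + (i : Int), y0 + (j : Int))))
      = (List.range (nx * ny)).map (fun (k : Nat) => (x0 + ((k % nx : Nat) : Int), y0 + ((k / nx : Nat) : Int))) := by
  intro ny
  induction ny with
  | zero => simp
  | succ n ih =>
    rw [List.range_succ, List.flatMap_append, ih, Nat.mul_succ, List.range_add, List.map_append,
      List.map_map, List.flatMap_singleton]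
    congr 1
    apply List.map_congr_left
    intro i hi
    simp only [List.mem_range] at hi
    have hpos : 0 < nx := Nat.lt_of_le_of_lt (Nat.zero_le i) hi
    have hmod : (nx * n + i) % nx = i := by
      rw [Nat.add_comm, Nat.add_mul_mod_self_left, Nat.mod_eq_of_lt hi]
    have hdiv : (nx * n + i) / nx = n := by
      rw [Nat.add_comm, Nat.add_mul_div_left _ _ hpos, Nat.div_eq_of_lt hi, Nat.zero_add]
    simp [Function.comp, hmod, hdiv]

-- A's double append-loop over two Int ranges equals B's flat divmod enumeration.
theorem pv_grid_eq (x0 x1 y0 y1 : Int) :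
    (PySem.List.pyRange y0 y1 1).foldl (fun acc y =>
        (PySem.List.pyRange x0 x1 1).foldl (fun acc2 x => acc2 ++ [(x, y)]) acc) []
      = (PySem.List.pyRange 0 (max (x1 - x0) 0 * max (y1 - y0) 0) 1).map
          (fun k => (x0 + PySem.Int.mod k (max (x1 - x0) 0),
                     y0 + PySem.Int.floordiv k (max (x1 - x0) 0))) := by
  have h1 : (PySem.List.pyRange y0 y1 1).foldl (fun acc y =>
        (PySem.List.pyRange x0 x1 1).foldl (fun acc2 x => acc2 ++ [(x, y)]) acc)
        ([] : List (Int × Int))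
      = (PySem.List.pyRange y0 y1 1).foldl
          (fun acc y => acc ++ (PySem.List.pyRange x0 x1 1).map (fun x => (x, y))) [] :=
    PySem.List.foldl_congr_mem _ _ _ _ (by
      intro acc y _
      rw [PySem.List.foldl_append_singleton_eq_map])
  rw [h1, PySem.List.foldl_append_eq_flatMap, List.nil_append]
  set nx : Nat := (x1 - x0).toNat with hnx
  set ny : Nat := (y1 - y0).toNat with hny
  have hmx : max (x1 - x0) 0 = (nx : Int) := by omega
  have hmy : max (y1 - y0) 0 = (ny : Int) := by omega
  rw [hmx, hmy, PySem.List.pyRange_one y0 y1, PySem.List.pyRange_one x0 x1,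
    PySem.List.pyRange_one 0 ((nx : Int) * ny)]
  have hcast : (((nx : Int) * (ny : Int)) - 0).toNat = nx * ny := by
    simp [Int.toNat_mul]
  rw [hcast, ← hny, ← hnx]
  simp only [List.flatMap_map, List.map_map, Function.comp_def, zero_add,
    PySem.Int.mod_natCast, PySem.Int.floordiv_natCast]
  exact pv_flatten nx x0 y0 ny

-- ===== VERDICT (by name: the statement is the Claim_ definition above) =====
theorem get_valid_reference_positions_for_ambiguity_py_spec : Claim_equal_get_valid_reference_positions_for_ambiguity_py := by
  intro sr w h _
  unfold Spec_get_valid_reference_positions_for_ambiguity_py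
  unfold get_valid_reference_positions_for_ambiguity_py get_valid_reference_positions_for_ambiguity_py_alt
  by_cases h1 : sr = "right_of"
  · subst h1
    have hb : (((((PySem.Dict.empty).insert "right_of" ((0 : Int), w - 2, (0 : Int), h)).insert
        "left_of" (2, w, 0, h)).insert "above" (0, w, 2, h)).insert
        "below" (0, w, 0, h - 2)).get? "right_of" = some (0, w - 2, 0, h) := by
      simp [PySem.Dict.get?, PySem.Dict.insert, PySem.Dict.empty, PySem.Dict.contains]
    simp only [if_pos (by decide : ("right_of" == "right_of") = true), hb]
    exact pv_grid_eq 0 (w - 2) 0 h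
  · by_cases h2 : sr = "left_of"
    · subst h2
      have hb : (((((PySem.Dict.empty).insert "right_of" ((0 : Int), w - 2, (0 : Int), h)).insert
          "left_of" (2, w, 0, h)).insert "above" (0, w, 2, h)).insert
          "below" (0, w, 0, h - 2)).get? "left_of" = some (2, w, 0, h) := by
        simp [PySem.Dict.get?, PySem.Dict.insert, PySem.Dict.empty, PySem.Dict.contains]
      rw [if_neg (by decide : ¬(("left_of" == "right_of") = true))]
      rw [if_pos (by decide : (("left_of" == "left_of") = true))]
      simp only [hb]
      exact pv_grid_eq 2 w 0 h
    · by_cases h3 : sr = "above"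
      · subst h3
        have hb : (((((PySem.Dict.empty).insert "right_of" ((0 : Int), w - 2, (0 : Int), h)).insert
            "left_of" (2, w, 0, h)).insert "above" (0, w, 2, h)).insert
            "below" (0, w, 0, h - 2)).get? "above" = some (0, w, 2, h) := by
          simp [PySem.Dict.get?, PySem.Dict.insert, PySem.Dict.empty, PySem.Dict.contains]
        rw [if_neg (by decide : ¬(("above" == "right_of") = true)), if_neg (by decide : ¬(("above" == "left_of") = true))]
        rw [if_pos (by decide : (("above" == "above") = true))]
        simp only [hb]
        exact pv_grid_eq 0 w 2 h
      · by_cases h4 : sr = "below"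
        · subst h4
          have hb : (((((PySem.Dict.empty).insert "right_of" ((0 : Int), w - 2, (0 : Int), h)).insert
              "left_of" (2, w, 0, h)).insert "above" (0, w, 2, h)).insert
              "below" (0, w, 0, h - 2)).get? "below" = some (0, w, 0, h - 2) := by
            simp [PySem.Dict.get?, PySem.Dict.insert, PySem.Dict.empty, PySem.Dict.contains]
          rw [if_neg (by decide : ¬(("below" == "right_of") = true)), if_neg (by decide : ¬(("below" == "left_of") = true)),
            if_neg (by decide : ¬(("below" == "above") = true))]
          rw [if_pos (by decide : (("below" == "below") = true))]
          simp only [hb]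
          exact pv_grid_eq 0 w 0 (h - 2)
        · have f1 : ("right_of" == sr) = false := by simp [Ne.symm h1]
          have f2 : ("left_of" == sr) = false := by simp [Ne.symm h2]
          have f3 : ("above" == sr) = false := by simp [Ne.symm h3]
          have f4 : ("below" == sr) = false := by simp [Ne.symm h4]
          have hb : (((((PySem.Dict.empty).insert "right_of" ((0 : Int), w - 2, (0 : Int), h)).insert
              "left_of" (2, w, 0, h)).insert "above" (0, w, 2, h)).insert
              "below" (0, w, 0, h - 2)).get? sr = none := by
            simp [PySem.Dict.get?, PySem.Dict.insert, PySem.Dict.empty, PySem.Dict.contains,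
              List.find?, f1, f2, f3, f4]
          have e1 : (sr == "right_of") = false := by simp [h1]
          have e2 : (sr == "left_of") = false := by simp [h2]
          have e3 : (sr == "above") = false := by simp [h3]
          have e4 : (sr == "below") = false := by simp [h4]
          simp only [hb, e1, e2, e3, e4, if_false, Bool.false_eq_true]
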